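-- pv_equiv track=rewrite | github.com/MatheusMFaccin/Python | Nova pasta/main.py | separaCoef_var
-- ===== SOURCE A (Python) =====
-- def separaCoef_var(termo):
--     tamanho = len(termo)
--     coef = ""
--     indice = 0
--     variavel = ''
--     for letra in termo:
--         if(letra.isdigit()):
--             coef = coef+letra
--             indice+=1
--         else:
--             if indice == 0: #a primeira letra não eh numero
--                 coef='1'
--             variavel = termo[indice:]
--             break
--     return coef,variavel
-- ===== SOURCE B (Python) =====
-- def separaCoef_var(termo):
--     variavel = termo.lstrip('0123456789')
--     coef = termo[:len(termo) - len(variavel)]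
--     return ((coef or '1') if variavel else coef), variavel
-- ===== Notes on version B (the rewrite author's own statement) =====
-- stated objective: idiomatic
-- what changed: Replaces the explicit character loop with break/index bookkeeping by a single lstrip of the digit prefix plus a slice, with the default coefficient expressed as a truthiness fallback.
import Mathlib
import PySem

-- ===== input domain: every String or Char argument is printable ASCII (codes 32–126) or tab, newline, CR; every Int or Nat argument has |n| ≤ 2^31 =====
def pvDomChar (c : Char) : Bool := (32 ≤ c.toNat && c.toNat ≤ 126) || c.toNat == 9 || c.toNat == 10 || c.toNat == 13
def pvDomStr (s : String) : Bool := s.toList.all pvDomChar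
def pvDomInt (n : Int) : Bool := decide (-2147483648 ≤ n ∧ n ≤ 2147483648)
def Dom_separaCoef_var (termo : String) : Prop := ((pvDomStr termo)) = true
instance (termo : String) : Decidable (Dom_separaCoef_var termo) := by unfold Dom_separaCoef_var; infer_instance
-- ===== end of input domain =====

-- B replaces A's explicit char loop (break + index bookkeeping) with an lstrip of the
-- digit prefix plus a slice; same return values, objective: idiomatic.

-- ===== PORT A =====
-- the for-loop over termo with state (coef, indice); the break returns immediately;
-- falling off the end returns the initial variavel = ''.
def sepLoopA (full : List Char) : List Char → List Char → Nat → String × String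
  | [], coef, _ => (String.mk coef, "")
  | letra :: rest, coef, indice =>
    if PySem.Chars.isdigit letra then
      sepLoopA full rest (coef ++ [letra]) (indice + 1)
    else
      ((if indice = 0 then "1" else String.mk coef),
       String.mk (full.drop indice))  -- termo[indice:] with 0 ≤ indice ≤ len: drop

def separaCoef_var (termo : String) : String × String :=
  sepLoopA termo.toList termo.toList [] 0

-- ===== PORT B =====
def separaCoef_var_alt (termo : String) : String × String :=
  let l := termo.toList
  -- termo.lstrip('0123456789'): drop the leading run of ASCII digits (exact here)
  let variavel := l.dropWhile PySem.Chars.isdigit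
  -- termo[:len(termo) - len(variavel)]: nonnegative in-range bound, a plain take
  let coef := String.mk (l.take (l.length - variavel.length))
  (if variavel ≠ [] then (if coef = "" then "1" else coef) else coef,
   String.mk variavel)

-- ===== PRECONDITION & SPEC =====
def Spec_separaCoef_var (termo : String) (out : String × String) : Prop := out = separaCoef_var_alt termo
instance (termo : String) (out : String × String) : Decidable (Spec_separaCoef_var termo out) := by unfold Spec_separaCoef_var; infer_instance

-- ===== CLAIM (what is proved, stated in full; the proofs are below) =====
def Claim_equal_separaCoef_var : Prop := ∀ (termo : String), Dom_separaCoef_var termo → Spec_separaCoef_var termo (separaCoef_var termo)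

-- ===== LEMMAS AND PROOFS =====

lemma sepLoopA_eq (full : List Char) :
    ∀ (l coef : List Char) (indice : Nat),
      sepLoopA full l coef indice =
        if (l.dropWhile PySem.Chars.isdigit) = [] then
          (String.mk (coef ++ l.takeWhile PySem.Chars.isdigit), "")
        else
          ((if indice + (l.takeWhile PySem.Chars.isdigit).length = 0 then "1"
            else String.mk (coef ++ l.takeWhile PySem.Chars.isdigit)),
           String.mk (full.drop (indice + (l.takeWhile PySem.Chars.isdigit).length))) := by
  intro l
  induction l with
  | nil => intro coef indice; simp [sepLoopA]
  | cons c rest ih =>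
    intro coef indice
    by_cases hc : PySem.Chars.isdigit c = true
    · simp only [sepLoopA, hc, if_true]
      rw [ih]
      simp only [List.takeWhile_cons, List.dropWhile_cons, hc, if_true, List.length_cons]
      have h0 : indice + 1 + (rest.takeWhile PySem.Chars.isdigit).length
          = indice + ((rest.takeWhile PySem.Chars.isdigit).length + 1) := by omega
      rw [h0]
      simp [List.append_assoc]
    · simp [sepLoopA, hc]

lemma take_takeWhile_length (p : Char → Bool) (l : List Char) :
    l.take (l.takeWhile p).length = l.takeWhile p := by
  induction l with
  | nil => simp
  | cons c rest ih => by_cases hc : p c = true <;> simp [hc, ih]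

lemma take_sub_eq_takeWhile (l : List Char) :
    l.take (l.length - (l.dropWhile PySem.Chars.isdigit).length)
      = l.takeWhile PySem.Chars.isdigit := by
  have hlen : l.length
      = (l.takeWhile PySem.Chars.isdigit).length + (l.dropWhile PySem.Chars.isdigit).length := by
    conv_lhs => rw [← List.takeWhile_append_dropWhile (p := PySem.Chars.isdigit) (l := l)]
    rw [List.length_append]
  have h2 : l.length - (l.dropWhile PySem.Chars.isdigit).length
      = (l.takeWhile PySem.Chars.isdigit).length := by omega
  rw [h2, take_takeWhile_length]

lemma mk_eq_empty (cs : List Char) : (String.mk cs = "") ↔ cs = [] := by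
  constructor
  · intro h
    have h2 := congrArg String.toList h
    rwa [show (String.mk cs).toList = cs from Eq.symm ((fun {l} {s} => String.ofList_eq.mp) rfl),
      show ("" : String).toList = [] from rfl] at h2
  · intro h; subst h; rfl

lemma drop_takeWhile_length (l : List Char) :
    l.drop (l.takeWhile PySem.Chars.isdigit).length = l.dropWhile PySem.Chars.isdigit := by
  have h := List.takeWhile_append_dropWhile (p := PySem.Chars.isdigit) (l := l)
  calc l.drop (l.takeWhile PySem.Chars.isdigit).length
      = ((l.takeWhile PySem.Chars.isdigit) ++ (l.dropWhile PySem.Chars.isdigit)).drop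
          (l.takeWhile PySem.Chars.isdigit).length := by rw [h]
    _ = l.dropWhile PySem.Chars.isdigit := List.drop_left

-- ===== VERDICT (by name: the statement is the Claim_ definition above) =====
theorem separaCoef_var_spec : Claim_equal_separaCoef_var := by
  intro termo _
  unfold Spec_separaCoef_var separaCoef_var separaCoef_var_alt
  dsimp only
  rw [sepLoopA_eq]
  set l := termo.toList with hl
  rw [take_sub_eq_takeWhile]
  simp only [Nat.zero_add, List.nil_append]
  by_cases h : l.dropWhile PySem.Chars.isdigit = []
  · have htw : l.takeWhile PySem.Chars.isdigit = l := by
      conv_rhs => rw [← List.takeWhile_append_dropWhile (p := PySem.Chars.isdigit) (l := l)]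
      rw [h, List.append_nil]
    simp only [h, if_true, ne_eq, not_true_eq_false, if_false, htw]
    rfl
  · rw [drop_takeWhile_length]
    simp only [ne_eq, h, not_false_eq_true, if_true]
    by_cases hz : l.takeWhile PySem.Chars.isdigit = []
    · rw [hz]
      simp [(mk_eq_empty []).mpr rfl]
    · have hlen : (l.takeWhile PySem.Chars.isdigit).length ≠ 0 := by
        simpa using hz
      have hne : ¬ (String.mk (l.takeWhile PySem.Chars.isdigit) = "") :=
        fun h' => hz ((mk_eq_empty _).mp h')
      simp [hlen, hne]
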